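-- pv_equiv track=rewrite | github.com/rukshar69/ProjectEuler100 | prb54.py | highestPair
-- ===== SOURCE A (Python) =====
-- from collections import Counter
--
-- value = {'A':14,'K':13,'Q':12,'J':11,'T':10,'9':9,'8':8,'7':7,'6':6,'5':5,'4':4,'3':3,'2':2,'1':1}
--
-- def valuesOfHand(hand):
--     vals = []
--     for h in hand:
--         c  = h[0]
--         vals.append(value[c])
--     vals.sort()
--     return vals
--
-- def highestPair(hand):
--     vals = valuesOfHand(hand)
--     valSet = set(vals)
--     repeated = (Counter(vals) - Counter(valSet)).keys()
--     highest = 0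
--     for i in repeated:
--
--         if i > highest:
--             highest = i
--     return highest
-- ===== SOURCE B (Python) =====
-- value = {'A':14,'K':13,'Q':12,'J':11,'T':10,'9':9,'8':8,'7':7,'6':6,'5':5,'4':4,'3':3,'2':2,'1':1}
--
-- def highestPair(hand):
--     # sorted-adjacency scan: the last adjacent equal pair in the ascending
--     # list carries the largest duplicated value; no Counter, no set.
--     vals = sorted(value[h[0]] for h in hand)
--     highest = 0
--     for a, b in zip(vals, vals[1:]):
--         if a == b:
--             highest = a
--     return highest
-- ===== Notes on version B (the rewrite author's own statement) =====
-- stated objective: simpler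
-- what changed: Replaces the Counter/set frequency subtraction that collects all repeated values with a single adjacency scan over the sorted value list: the last index where vals[i] == vals[i+1] carries the largest duplicated value, so no Counter and no set are built.
import Mathlib
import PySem

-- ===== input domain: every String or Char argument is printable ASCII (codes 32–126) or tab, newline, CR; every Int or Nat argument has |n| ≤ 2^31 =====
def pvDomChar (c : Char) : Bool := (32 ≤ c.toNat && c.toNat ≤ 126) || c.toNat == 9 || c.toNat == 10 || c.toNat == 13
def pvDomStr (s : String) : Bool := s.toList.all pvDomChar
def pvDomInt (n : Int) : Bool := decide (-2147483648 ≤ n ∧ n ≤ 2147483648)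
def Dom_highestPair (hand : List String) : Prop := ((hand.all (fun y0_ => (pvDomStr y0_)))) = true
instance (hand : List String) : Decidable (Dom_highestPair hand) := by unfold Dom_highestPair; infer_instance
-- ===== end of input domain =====

-- B replaces A's Counter/set frequency subtraction with one adjacency scan over the
-- sorted values (simpler); equal on Pre_ (hands whose cards A's value table accepts).

-- ===== PORT A =====
-- module-level dict `value`
def pvValue : PySem.Dict Char Int :=
  PySem.Dict.ofList [('A',14),('K',13),('Q',12),('J',11),('T',10),('9',9),('8',8),('7',7),('6',6),('5',5),('4',4),('3',3),('2',2),('1',1)]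

-- value[h[0]]  (IndexError/KeyError → excluded by Pre_; the .getD 0 is unreachable inside Pre_)
def cardVal (h : String) : Int :=
  ((PySem.Str.pyGet? h 0).bind (fun c => pvValue.get? c)).getD 0

def valuesOfHand (hand : List String) : List Int :=
  let vals := hand.foldl (fun vals h => vals ++ [cardVal h]) []
  PySem.List.sorted vals (fun x => x) false

-- Counter.__sub__ (CPython): keep positive differences over c1's items, then add keys of
-- c2 missing from c1 whose count is negative
def counterSub (c1 c2 : PySem.Dict Int Int) : PySem.Dict Int Int :=
  let r := c1.items.foldl (fun r p =>
      if 0 < p.2 - c2.getD p.1 0 then r.insert p.1 (p.2 - c2.getD p.1 0) else r)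
    PySem.Dict.empty
  c2.items.foldl (fun r p =>
      if (!(c1.contains p.1)) && decide (p.2 < 0) then r.insert p.1 (0 - p.2) else r) r

def highestPair (hand : List String) : Int :=
  let vals := valuesOfHand hand
  let valSet := PySem.Set.ofList vals
  let repeated := (counterSub (PySem.Dict.counter vals) (PySem.Dict.counter valSet)).keys
  repeated.foldl (fun highest i => if highest < i then i else highest) 0

-- ===== PORT B =====
def highestPair_alt (hand : List String) : Int :=
  let vals := PySem.List.sorted (hand.map (fun h => cardVal h)) (fun x => x) false
  (vals.zip (PySem.List.slice vals (some 1) none)).foldl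
    (fun highest p => if p.1 == p.2 then p.1 else highest) 0

-- ===== PRECONDITION & SPEC =====
def pvCardChars : List Char := ['A','K','Q','J','T','9','8','7','6','5','4','3','2','1']

-- Pre_ excludes exactly the hands on which A raises: a card that is the empty string
-- (IndexError on h[0]) or whose first character is not a key of `value` (KeyError).
def Pre_highestPair (hand : List String) : Prop :=
  ∀ h ∈ hand, h.toList ≠ [] ∧ h.toList.headD ' ' ∈ pvCardChars
instance (hand : List String) : Decidable (Pre_highestPair hand) := by
  unfold Pre_highestPair; infer_instance

def pvWitness_highestPair : List String := ["AH", "AS", "3C"]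

def Spec_highestPair (hand : List String) (out : Int) : Prop := out = highestPair_alt hand
instance (hand : List String) (out : Int) : Decidable (Spec_highestPair hand out) := by
  unfold Spec_highestPair; infer_instance

-- ===== CLAIM (what is proved, stated in full; the proofs are below) =====
def Claim_equal_highestPair : Prop :=
  ∀ (hand : List String), Dom_highestPair hand → Pre_highestPair hand →
    Spec_highestPair hand (highestPair hand)

-- ===== LEMMAS AND PROOFS =====

-- B's adjacency loop as structural recursion (proof helper)
def pvScan (h : Int) : List Int → Int
  | x :: y :: t => pvScan (if x = y then x else h) (y :: t)
  | _ => h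

-- the values carrying an adjacent equal pair
def pvDups : List Int → List Int
  | x :: y :: t => (if x = y then [x] else []) ++ pvDups (y :: t)
  | _ => []

lemma pvZipFold_eq_scan (s : List Int) (h : Int) :
    (s.zip s.tail).foldl (fun highest p => if p.1 == p.2 then p.1 else highest) h
      = pvScan h s := by
  induction s generalizing h with
  | nil => simp [pvScan]
  | cons x t ih =>
    cases t with
    | nil => simp [pvScan]
    | cons y t' =>
      have ih' := ih (if x = y then x else h)
      simp only [List.tail_cons] at ih' ⊢
      simp only [List.zip_cons_cons, List.foldl_cons]
      rw [pvScan, show (if (x == y) = true then x else h) = if x = y then x else h from by simp]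
      exact ih'

lemma pvScan_mem (s : List Int) (h : Int) :
    pvScan h s = h ∨ pvScan h s ∈ pvDups s := by
  induction s generalizing h with
  | nil => simp [pvScan]
  | cons x t ih =>
    cases t with
    | nil => simp [pvScan, pvDups]
    | cons y t' =>
      rcases ih (if x = y then x else h) with h1 | h1
      · simp only [pvScan, pvDups, List.mem_append]
        rw [h1]
        split_ifs with hxy
        · exact Or.inr (Or.inl (by simp))
        · exact Or.inl rfl
      · exact Or.inr (by simp only [pvDups, List.mem_append]; exact Or.inr h1)

lemma pvDups_subset (s : List Int) (v : Int) (hv : v ∈ pvDups s) :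
    v ∈ s ∧ 2 ≤ s.count v := by
  induction s with
  | nil => simp [pvDups] at hv
  | cons x t ih =>
    cases t with
    | nil => simp [pvDups] at hv
    | cons y t' =>
      simp only [pvDups, List.mem_append] at hv
      rcases hv with hv | hv
      · have hxy : x = y := by
          by_cases h' : x = y
          · exact h'
          · simp [h'] at hv
        subst hxy
        simp at hv
        subst hv
        refine ⟨by simp, ?_⟩
        rw [List.count_cons_self, List.count_cons_self]
        omega
      · obtain ⟨h1, h2⟩ := ih hv
        exact ⟨List.mem_cons_of_mem _ h1, by rw [List.count_cons]; omega⟩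

lemma pvCount_mem_dups (s : List Int) (hs : s.Pairwise (· ≤ ·)) (v : Int)
    (hc : 2 ≤ s.count v) : v ∈ pvDups s := by
  induction s with
  | nil => simp at hc
  | cons x t ih =>
    have hp := (List.pairwise_cons.mp hs).1
    have hst := (List.pairwise_cons.mp hs).2
    by_cases hxv : x = v
    · -- v is the head; a second occurrence is in t, and sortedness makes t's head = v
      subst hxv
      have hct : 1 ≤ t.count x := by
        rw [List.count_cons, if_pos (by simp)] at hc; omega
      have hmem : x ∈ t := by
        by_contra hmem
        rw [List.count_eq_zero_of_not_mem hmem] at hct; omega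
      cases t with
        | nil => simp at hmem
        | cons y t' =>
          have hxy : x = y := by
            have h1 : x ≤ y := hp y (by simp)
            have h2 : y ≤ x := by
              rcases List.mem_cons.mp hmem with h | h
              · omega
              · have := (List.pairwise_cons.mp hst).1 x h; omega
            omega
          subst hxy
          simp [pvDups]
    · -- both occurrences are in t
      have hct : 2 ≤ t.count v := by
        rw [List.count_cons, if_neg (by simpa using hxv)] at hc; omega
      have := ih hst hct
      cases t with
        | nil => simp at hct
        | cons y t' => simp only [pvDups, List.mem_append]; exact Or.inr this

lemma pvScan_ge (s : List Int) (hs : s.Pairwise (· ≤ ·)) (v : Int)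
    (hv : v ∈ pvDups s) (h : Int) : v ≤ pvScan h s := by
  induction s generalizing h with
  | nil => simp [pvDups] at hv
  | cons x t ih =>
    cases t with
    | nil => simp [pvDups] at hv
    | cons y t' =>
      have hp := (List.pairwise_cons.mp hs).1
      have hst := (List.pairwise_cons.mp hs).2
      simp only [pvDups, List.mem_append] at hv
      rcases hv with hv | hv
      · have hxy : x = y := by
          by_cases h' : x = y
          · exact h'
          · simp [h'] at hv
        subst hxy
        simp at hv
        subst hv
        rw [pvScan, if_pos rfl]
        rcases pvScan_mem (v :: t') v with h1 | h1
        · omega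
        · exact hp _ (pvDups_subset _ _ h1).1
      · rw [pvScan]
        exact ih hst hv _

lemma pvScan_init_le (s : List Int) (h : Int)
    (hd : ∀ w ∈ pvDups s, h ≤ w) : h ≤ pvScan h s := by
  rcases pvScan_mem s h with h1 | h1
  · omega
  · exact hd _ h1

-- keys of A's first subtraction loop: membership
lemma pvKeys_foldl_insert_if (l : List (Int × Int)) (g : Int → Int)
    (r : PySem.Dict Int Int) (k : Int) :
    (k ∈ (l.foldl (fun r p =>
        if 0 < p.2 - g p.1 then r.insert p.1 (p.2 - g p.1) else r) r).keys)
      ↔ k ∈ r.keys ∨ ∃ p ∈ l, 0 < p.2 - g p.1 ∧ p.1 = k := by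
  induction l generalizing r with
  | nil => simp
  | cons p l ih =>
    simp only [List.foldl_cons]
    split_ifs with hp
    · rw [ih]
      simp only [PySem.Dict.mem_keys_insert, List.mem_cons]
      constructor
      · rintro (⟨h1 | h1⟩ | ⟨q, hq1, hq2⟩)
        · exact Or.inr ⟨p, Or.inl rfl, hp, h1.symm⟩
        · exact Or.inl h1
        · exact Or.inr ⟨q, Or.inr hq1, hq2⟩
      · rintro (h1 | ⟨q, (rfl | hq1), hq2, hq3⟩)
        · exact Or.inl (Or.inr h1)
        · exact Or.inl (Or.inl hq3.symm)
        · exact Or.inr ⟨q, hq1, hq2, hq3⟩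
    · rw [ih]
      simp only [List.mem_cons]
      constructor
      · rintro (h1 | ⟨q, hq1, hq2⟩)
        · exact Or.inl h1
        · exact Or.inr ⟨q, Or.inr hq1, hq2⟩
      · rintro (h1 | ⟨q, (rfl | hq1), hq2, hq3⟩)
        · exact Or.inl h1
        · exact absurd hq2 (by omega)
        · exact Or.inr ⟨q, hq1, hq2, hq3⟩

lemma pvFoldl_noop {α β : Type} (l : List β) (f : α → β → α) (r : α)
    (h : ∀ p ∈ l, ∀ r, f r p = r) : l.foldl f r = r := by
  induction l generalizing r with
  | nil => rfl
  | cons p l ih =>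
    rw [List.foldl_cons, h p (by simp), ih]
    intro q hq r'; exact h q (by simp [hq]) r'

lemma pvFoldl_if_max (l : List Int) (a : Int) :
    l.foldl (fun highest i => if highest < i then i else highest) a = l.foldl max a := by
  induction l generalizing a with
  | nil => rfl
  | cons x l ih =>
    simp only [List.foldl_cons]
    rw [ih]
    congr 1
    rw [max_def]; split_ifs <;> omega

lemma pvCardVal_pos (h : String) (hn : h.toList ≠ [])
    (hm : h.toList.headD ' ' ∈ pvCardChars) : 1 ≤ cardVal h := by
  obtain ⟨c, r, hc⟩ := List.exists_cons_of_ne_nil hn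
  rw [hc] at hm
  simp only [List.headD_cons] at hm
  have hg : PySem.Str.pyGet? h 0 = some c := by
    simp [pysem, hc, PySem.List.pyGet?, PySem.List.pyIdx?]
  have hm' : c ∈ ['A','K','Q','J','T','9','8','7','6','5','4','3','2','1'] := hm
  unfold cardVal
  rw [hg]
  fin_cases hm' <;> decide

-- ===== VERDICT (by name: the statement is the Claim_ definition above) =====
theorem highestPair_spec : Claim_equal_highestPair := by
  intro hand _ hpre
  unfold Spec_highestPair highestPair highestPair_alt valuesOfHand counterSub
  simp only [PySem.List.foldl_append_singleton_eq_map, List.nil_append,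
    PySem.List.slice_from_one]
  set s := PySem.List.sorted (List.map (fun h => cardVal h) hand) (fun x => x) false with hs
  have hsort : s.Pairwise (· ≤ ·) := by
    have := PySem.List.sorted_pairwise (List.map (fun h => cardVal h) hand) (fun x => x)
    simpa using this
  have hpos : ∀ v ∈ s, 1 ≤ v := by
    intro v hv
    rw [hs, PySem.List.mem_sorted] at hv
    obtain ⟨g, hg, rfl⟩ := List.mem_map.mp hv
    exact pvCardVal_pos g (hpre g hg).1 (hpre g hg).2
  have hone : ∀ k : Int, k ∈ s → (PySem.Set.ofList s).count k = 1 := by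
    intro k hk
    have h1 := List.nodup_iff_count_le_one.mp (PySem.Set.nodup_ofList s) k
    have h2 : 0 < (PySem.Set.ofList s).count k :=
      List.count_pos_iff.mpr ((PySem.Set.mem_ofList s k).mpr hk)
    omega
  -- the second Counter.__sub__ loop never fires: counts in Counter(valSet) are nonnegative
  rw [pvFoldl_noop ((PySem.Dict.counter (PySem.Set.ofList s)).items) _ _ (by
    intro p hp r'
    rw [PySem.Dict.items_counter] at hp
    obtain ⟨k', _, rfl⟩ := List.mem_map.mp hp
    rw [if_neg (by simp)])]
  rw [pvFoldl_if_max, pvZipFold_eq_scan]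
  -- membership in the keys of the first loop's result
  have hkeys : ∀ k : Int,
      (k ∈ ((PySem.Dict.counter s).items.foldl (fun r p =>
          if 0 < p.2 - (PySem.Dict.counter (PySem.Set.ofList s)).getD p.1 0
          then r.insert p.1 (p.2 - (PySem.Dict.counter (PySem.Set.ofList s)).getD p.1 0)
          else r) PySem.Dict.empty).keys)
        ↔ k ∈ s ∧ 2 ≤ s.count k := by
    intro k
    rw [pvKeys_foldl_insert_if _ (fun k => (PySem.Dict.counter (PySem.Set.ofList s)).getD k 0)]
    simp only [PySem.Dict.keys_empty, List.not_mem_nil, false_or]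
    constructor
    · rintro ⟨p, hp, hcond, rfl⟩
      rw [PySem.Dict.items_counter] at hp
      obtain ⟨k', hk', rfl⟩ := List.mem_map.mp hp
      have hk'mem : k' ∈ s := (PySem.Set.mem_ofList s k').mp hk'
      dsimp only at hcond ⊢
      rw [PySem.Dict.getD_counter, hone k' hk'mem] at hcond
      exact ⟨hk'mem, by omega⟩
    · rintro ⟨hmem, hcnt⟩
      refine ⟨(k, (s.count k : Int)), ?_, ?_, rfl⟩
      · rw [PySem.Dict.items_counter]
        exact List.mem_map.mpr ⟨k, (PySem.Set.mem_ofList s k).mpr hmem, rfl⟩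
      · show 0 < (s.count k : Int) - (PySem.Dict.counter (PySem.Set.ofList s)).getD k 0
        rw [PySem.Dict.getD_counter, hone k hmem]; omega
  set K := ((PySem.Dict.counter s).items.foldl (fun r p =>
      if 0 < p.2 - (PySem.Dict.counter (PySem.Set.ofList s)).getD p.1 0
      then r.insert p.1 (p.2 - (PySem.Dict.counter (PySem.Set.ofList s)).getD p.1 0)
      else r) PySem.Dict.empty).keys with hK
  apply le_antisymm
  · rcases PySem.List.foldl_max_mem K 0 with hA | hA
    · rw [hA]
      apply pvScan_init_le
      intro w hw
      have := hpos w (pvDups_subset s w hw).1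
      omega
    · have hk := (hkeys _).mp hA
      exact pvScan_ge s hsort _ (pvCount_mem_dups s hsort _ hk.2) 0
  · rcases pvScan_mem s 0 with hB | hB
    · rw [hB]
      exact (PySem.List.le_foldl_max _ 0).1
    · have hsub := pvDups_subset s _ hB
      exact (PySem.List.le_foldl_max _ 0).2 _ ((hkeys _).mpr hsub)
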